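-- pv_equiv track=rewrite | github.com/hunter21actual/algorithms | Gayle Shapley Algorithm/stableMarriage.py | preference
-- ===== SOURCE A (Python) =====
-- def preference(mat, w, man, man1):
-- 	man1_rank = 0
-- 	for i in range(len(mat[w])):
-- 		if(mat[w][i] == man1):
-- 			man1_rank = i + 1
-- 			break
--
-- 	man_rank = 0
-- 	for i in range(len(mat[w])):
-- 		if(mat[w][i] == man):
-- 			man_rank = i + 1
-- 			break
--
-- 	if(man_rank < man1_rank):
-- 		return True
-- 	return False
-- ===== SOURCE B (Python) =====
-- def preference(mat, w, man, man1):
--     # Single-pass state machine: decide the comparison directly while scanning,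
--     # never computing ranks. state 0 = neither seen, 1 = man seen first, 2 = man1 seen first.
--     row = mat[w]
--     state = 0
--     for x in row:
--         if state == 0:
--             if x == man1:
--                 if x == man:
--                     return False
--                 state = 2
--             elif x == man:
--                 state = 1
--         elif state == 1:
--             if x == man1:
--                 return True
--         else:
--             if x == man:
--                 return False
--     return state == 2
-- ===== Notes on version B (the rewrite author's own statement) =====
-- stated objective: alternative
-- what changed: Replaces A's two rank-computing scan-with-break loops and final rank comparison by a single-pass three-state machine over the row that decides the comparison directly while scanning, with early exits and no ranks computed.
import Mathlib
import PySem

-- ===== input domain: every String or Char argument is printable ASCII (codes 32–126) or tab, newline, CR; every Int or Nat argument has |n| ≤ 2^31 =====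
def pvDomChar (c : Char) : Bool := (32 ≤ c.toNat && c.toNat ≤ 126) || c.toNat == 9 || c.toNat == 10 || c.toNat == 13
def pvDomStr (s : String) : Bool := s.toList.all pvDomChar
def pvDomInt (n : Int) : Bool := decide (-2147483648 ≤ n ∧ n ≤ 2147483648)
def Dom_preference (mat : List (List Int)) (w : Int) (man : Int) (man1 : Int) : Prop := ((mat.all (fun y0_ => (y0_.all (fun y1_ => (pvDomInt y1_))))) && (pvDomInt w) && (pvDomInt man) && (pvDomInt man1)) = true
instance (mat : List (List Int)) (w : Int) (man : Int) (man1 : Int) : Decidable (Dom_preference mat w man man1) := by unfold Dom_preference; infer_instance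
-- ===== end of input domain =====

-- B replaces A's two rank-computing scans with a single-pass three-state machine
-- that decides the comparison directly while scanning; objective: alternative.

-- ===== PORT A =====
-- A's scan-with-break loop: rank of the first occurrence of t (index+1), 0 if absent.
def pvScanA : List Int → Int → Nat → Int
  | [], _, _ => 0
  | x :: xs, t, i => if x == t then (i : Int) + 1 else pvScanA xs t (i + 1)

def preference (mat : List (List Int)) (w : Int) (man : Int) (man1 : Int) : Bool :=
  match PySem.List.pyGet? mat w with
  | none => false   -- unreachable under Pre_ (Python raises IndexError here)
  | some row =>
    let man1_rank := pvScanA row man1 0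
    let man_rank := pvScanA row man 0
    decide (man_rank < man1_rank)

-- ===== PORT B =====
-- B's single-pass state machine: state 0 = neither seen, 1 = man seen first, 2 = man1 seen first.
def pvGo (man man1 : Int) : List Int → Nat → Bool
  | [], st => st == 2
  | x :: xs, st =>
    if st == 0 then
      if x == man1 then
        (if x == man then false else pvGo man man1 xs 2)
      else if x == man then pvGo man man1 xs 1
      else pvGo man man1 xs 0
    else if st == 1 then
      (if x == man1 then true else pvGo man man1 xs 1)
    else
      (if x == man then false else pvGo man man1 xs 2)

def preference_alt (mat : List (List Int)) (w : Int) (man : Int) (man1 : Int) : Bool :=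
  match PySem.List.pyGet? mat w with
  | none => false   -- unreachable under Pre_
  | some row => pvGo man man1 row 0

-- ===== PRECONDITION & SPEC =====
-- Pre_ excludes exactly the inputs where Python's mat[w] raises IndexError.
def Pre_preference (mat : List (List Int)) (w : Int) (man : Int) (man1 : Int) : Prop :=
  -(mat.length : Int) ≤ w ∧ w < (mat.length : Int)
instance (mat : List (List Int)) (w : Int) (man : Int) (man1 : Int) : Decidable (Pre_preference mat w man man1) := by unfold Pre_preference; infer_instance

def pvWitness_preference : List (List Int) × Int × Int × Int := ([[2, 0, 1], [1, 2, 0]], 1, 2, 0)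

def Spec_preference (mat : List (List Int)) (w : Int) (man : Int) (man1 : Int) (out : Bool) : Prop := out = preference_alt mat w man man1
instance (mat : List (List Int)) (w : Int) (man : Int) (man1 : Int) (out : Bool) : Decidable (Spec_preference mat w man man1 out) := by unfold Spec_preference; infer_instance

-- ===== CLAIM (what is proved, stated in full; the proofs are below) =====
def Claim_equal_preference : Prop := ∀ (mat : List (List Int)) (w : Int) (man : Int) (man1 : Int), Dom_preference mat w man man1 → Pre_preference mat w man man1 → Spec_preference mat w man man1 (preference mat w man man1)

-- ===== LEMMAS AND PROOFS =====

lemma pvScanA_not_mem {t : Int} : ∀ {xs : List Int} (i : Nat), t ∉ xs → pvScanA xs t i = 0 := by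
  intro xs; induction xs with
  | nil => intro i _; rfl
  | cons x xs ih =>
    intro i h
    have hxt : x ≠ t := fun hh => h (by simp [hh])
    have hx : (x == t) = false := by simp [hxt]
    simpa [pvScanA, hx] using ih (i + 1) (fun hm => h (List.mem_cons_of_mem _ hm))

lemma pvScanA_mem {t : Int} : ∀ {xs : List Int} (i : Nat), t ∈ xs → (i : Int) + 1 ≤ pvScanA xs t i := by
  intro xs; induction xs with
  | nil => intro i h; cases h
  | cons x xs ih =>
    intro i h
    by_cases hx : x = t
    · simp [pvScanA, hx]
    · have hm : t ∈ xs := by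
        rcases List.mem_cons.1 h with h1 | h1
        · exact absurd h1.symm hx
        · exact h1
      have h5 := ih (i + 1) hm
      have hb : (x == t) = false := by simp [hx]
      simp only [pvScanA, hb, if_false]
      push_cast at h5 ⊢; omega

-- state 1: man already seen; result = whether man1 occurs in the rest
lemma pvGo_one (man man1 : Int) : ∀ (xs : List Int), pvGo man man1 xs 1 = decide (man1 ∈ xs) := by
  intro xs; induction xs with
  | nil => simp [pvGo]
  | cons x xs ih =>
    by_cases hx : x = man1
    · simp [pvGo, hx]
    · have hb : (x == man1) = false := by simp [hx]
      simp [pvGo, hb, ih, Ne.symm hx]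

-- state 2: man1 already seen; result = whether man does NOT occur in the rest
lemma pvGo_two (man man1 : Int) : ∀ (xs : List Int), pvGo man man1 xs 2 = decide (man ∉ xs) := by
  intro xs; induction xs with
  | nil => simp [pvGo]
  | cons x xs ih =>
    by_cases hx : x = man
    · simp [pvGo, hx]
    · have hb : (x == man) = false := by simp [hx]
      simp [pvGo, hb, ih, Ne.symm hx]

lemma pvGo_zero (man man1 : Int) : ∀ (xs : List Int) (i : Nat),
    decide (pvScanA xs man i < pvScanA xs man1 i) = pvGo man man1 xs 0 := by
  intro xs; induction xs with
  | nil => intro i; simp [pvScanA, pvGo]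
  | cons x xs ih =>
    intro i
    by_cases h1 : x = man1
    · by_cases h2 : x = man
      · have e1 : (x == man1) = true := by simp [h1]
        have e2 : (x == man) = true := by simp [h2]
        simp only [pvScanA, pvGo, e1, e2, if_true]
        simp
      · have e1 : (x == man1) = true := by simp [h1]
        have e2 : (x == man) = false := by simp [h2]
        simp only [pvScanA, pvGo, e1, e2, if_true, if_false]
        rw [pvGo_two]
        by_cases hm : man ∈ xs
        · have h5 := pvScanA_mem (t := man) (i + 1) hm
          have h6 : ¬ (pvScanA xs man (i + 1) < (i : Int) + 1) := by push_cast at h5 ⊢; omega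
          simp [h6, hm]
        · have h0 := pvScanA_not_mem (t := man) (i + 1) hm
          have h6 : pvScanA xs man (i + 1) < (i : Int) + 1 := by rw [h0]; omega
          simp [h6, hm]
    · by_cases h2 : x = man
      · have e1 : (x == man1) = false := by simp [h1]
        have e2 : (x == man) = true := by simp [h2]
        simp only [pvScanA, pvGo, e1, e2, if_true, if_false]
        rw [pvGo_one]
        by_cases hm : man1 ∈ xs
        · have h5 := pvScanA_mem (t := man1) (i + 1) hm
          have h6 : (i : Int) + 1 < pvScanA xs man1 (i + 1) := by push_cast at h5 ⊢; omega
          simp [h6, hm]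
        · have h0 := pvScanA_not_mem (t := man1) (i + 1) hm
          have h6 : ¬ ((i : Int) + 1 < pvScanA xs man1 (i + 1)) := by rw [h0]; omega
          simp [h6, hm]
      · have e1 : (x == man1) = false := by simp [h1]
        have e2 : (x == man) = false := by simp [h2]
        simp only [pvScanA, pvGo, e1, e2, if_false]
        exact ih (i + 1)

-- ===== VERDICT (by name: the statement is the Claim_ definition above) =====
theorem preference_spec : Claim_equal_preference := by
  intro mat w man man1 _ _
  unfold Spec_preference preference preference_alt
  cases h : PySem.List.pyGet? mat w with
  | none => rfl
  | some row => exact pvGo_zero man man1 row 0
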